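-- pv_equiv track=rewrite | github.com/MacromNex/highfold_med_mcp | scripts/lib/cyclic_peptides.py | validate_highfold_sequence
-- ===== SOURCE A (Python) =====
-- def validate_highfold_sequence(sequence: str) -> bool:
--     """
--     Validate that sequence uses valid HighFold notation for cyclic peptides.
--
--     Args:
--         sequence: Peptide sequence string
--
--     Returns:
--         bool: True if valid HighFold notation
--
--     Examples:
--         >>> validate_highfold_sequence("PhdLP_d")
--         True
--         >>> validate_highfold_sequence("VIhFIh.")
--         True
--         >>> validate_highfold_sequence("INVALID@SEQ")
--         False
--     """
--     if not sequence or not isinstance(sequence, str):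
--         return False
--
--     # Check for valid characters in HighFold notation
--     valid_chars = set('ABCDEFGHIJKLMNOPQRSTUVWXYZabcdefghijklmnopqrstuvwxyz0123456789._/')
--     if not all(c in valid_chars for c in sequence):
--         return False
--
--     # Basic length check
--     clean_seq = sequence.replace('/', '').replace('.', '').replace('_', '')
--     if len(clean_seq) < 3 or len(clean_seq) > 50:
--         return False
--
--     return True
-- ===== SOURCE B (Python) =====
-- _VALID = frozenset('ABCDEFGHIJKLMNOPQRSTUVWXYZabcdefghijklmnopqrstuvwxyz0123456789._/')
--
-- def validate_highfold_sequence(sequence: str) -> bool: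
--     if not sequence or not isinstance(sequence, str):
--         return False
--     count = 0
--     for c in sequence:
--         if c not in _VALID:
--             return False
--         if c not in '/._':
--             count += 1
--     return 3 <= count <= 50
-- ===== Notes on version B (the rewrite author's own statement) =====
-- stated objective: simpler
-- what changed: Replaced the four separate passes (an all() scan plus three .replace() copies plus len) with one loop that rejects on the first invalid character and counts non-separator characters as it goes, then checks 3<=count<=50.
import Mathlib
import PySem

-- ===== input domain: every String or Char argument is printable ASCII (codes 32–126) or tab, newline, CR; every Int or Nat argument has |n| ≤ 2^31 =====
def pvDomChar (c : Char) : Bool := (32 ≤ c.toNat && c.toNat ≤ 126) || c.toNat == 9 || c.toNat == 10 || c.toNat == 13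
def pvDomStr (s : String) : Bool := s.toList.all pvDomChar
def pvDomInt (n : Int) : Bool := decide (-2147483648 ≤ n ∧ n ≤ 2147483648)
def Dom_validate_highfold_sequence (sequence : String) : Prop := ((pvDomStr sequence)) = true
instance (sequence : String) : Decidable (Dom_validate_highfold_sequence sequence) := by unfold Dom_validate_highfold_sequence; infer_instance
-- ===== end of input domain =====

-- B replaces A's four passes (an all() scan, three .replace() copies, len) by one
-- early-exiting loop that counts non-separator characters; objective: simpler, same O(n).


-- ===== PORT A =====
-- valid_chars = set('ABCDEFGHIJKLMNOPQRSTUVWXYZabcdefghijklmnopqrstuvwxyz0123456789._/')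
def pvValidChars : PySem.Set Char :=
  PySem.Set.ofList "ABCDEFGHIJKLMNOPQRSTUVWXYZabcdefghijklmnopqrstuvwxyz0123456789._/".toList

def validate_highfold_sequence (sequence : String) : Bool :=
  if sequence = "" then false
  else if !(sequence.toList.all (fun c => PySem.Set.contains pvValidChars c)) then false
  else
    let clean_seq := PySem.Str.replace (PySem.Str.replace (PySem.Str.replace sequence "/" "") "." "") "_" ""
    if PySem.Str.len clean_seq < 3 || 50 < PySem.Str.len clean_seq then false
    else true

-- ===== PORT B =====
-- the loop of Source B: reject on first invalid char, count non-separator chars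
def pvAltGo : List Char → Nat → Bool
  | [], count => decide (3 ≤ count ∧ count ≤ 50)
  | c :: t, count =>
    if !(PySem.Set.contains pvValidChars c) then false
    else if c != '/' && c != '.' && c != '_' then pvAltGo t (count + 1)
    else pvAltGo t count

def validate_highfold_sequence_alt (sequence : String) : Bool :=
  if sequence = "" then false
  else pvAltGo sequence.toList 0

-- ===== PRECONDITION & SPEC =====
def Spec_validate_highfold_sequence (sequence : String) (out : Bool) : Prop := out = validate_highfold_sequence_alt sequence
instance (sequence : String) (out : Bool) : Decidable (Spec_validate_highfold_sequence sequence out) := by unfold Spec_validate_highfold_sequence; infer_instance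

-- ===== CLAIM (what is proved, stated in full; the proofs are below) =====
def Claim_equal_validate_highfold_sequence : Prop := ∀ (sequence : String), Dom_validate_highfold_sequence sequence → Spec_validate_highfold_sequence sequence (validate_highfold_sequence sequence)

-- ===== LEMMAS AND PROOFS =====

-- replacing a single character by the empty string is filtering it out
theorem replace_go_single (c : Char) (l acc : List Char) (fuel : Nat) (h : l.length ≤ fuel) :
    PySem.Chars.replace.go [c] [] fuel l acc = acc.reverse ++ l.filter (· ≠ c) := by
  induction fuel generalizing l acc with
  | zero =>
    cases l with
    | nil => simp [PySem.Chars.replace.go]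
    | cons a t => simp at h
  | succ n ih =>
    cases l with
    | nil => simp [PySem.Chars.replace.go]
    | cons a t =>
      have hlen : t.length ≤ n := by simpa using h
      simp only [PySem.Chars.replace.go]
      by_cases hac : a = c
      · subst hac
        have hp : List.isPrefixOf [a] (a :: t) = true := by simp [List.isPrefixOf]
        rw [hp, if_pos rfl]
        simp only [List.length_cons, List.length_nil, Nat.zero_add, List.drop_succ_cons,
          List.drop_zero, List.reverse_nil, List.nil_append]
        rw [ih t acc hlen]
        simp [List.filter]
      · have hp : List.isPrefixOf [c] (a :: t) = false := by
          simp [List.isPrefixOf]; exact fun h' => (hac h'.symm).elim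
        rw [hp]
        simp only [Bool.false_eq_true, if_false]
        rw [ih t (a :: acc) hlen]
        simp [List.filter, hac]

theorem replace_single (c : Char) (l : List Char) :
    PySem.Chars.replace l [c] [] = l.filter (· ≠ c) := by
  simp only [PySem.Chars.replace, List.isEmpty_cons, Bool.false_eq_true, if_false]
  simpa using replace_go_single c l [] l.length le_rfl

-- characterisation of B's loop
set_option maxRecDepth 8000 in
theorem pvAltGo_spec (l : List Char) (count : Nat) :
    pvAltGo l count =
      if l.all (fun c => PySem.Set.contains pvValidChars c) then
        decide (3 ≤ count + (l.filter (fun c => c != '/' && c != '.' && c != '_')).length ∧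
                count + (l.filter (fun c => c != '/' && c != '.' && c != '_')).length ≤ 50)
      else false := by
  induction l generalizing count with
  | nil => simp [pvAltGo]
  | cons a t ih =>
    simp only [pvAltGo, List.all_cons]
    by_cases hv : PySem.Set.contains pvValidChars a = true
    · simp only [hv, Bool.not_true, Bool.false_eq_true, if_false, Bool.true_and]
      by_cases hs : (a != '/' && a != '.' && a != '_') = true
      · rw [if_pos hs, ih]
        simp only [List.filter_cons, hs, if_true]
        by_cases ht : t.all (fun c => PySem.Set.contains pvValidChars c) = true
        · rw [if_pos ht, if_pos ht]
          set m := (t.filter (fun c => c != '/' && c != '.' && c != '_')).length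
          have : count + 1 + m = count + (m + 1) := by omega
          rw [List.length_cons, this]
        · rw [if_neg ht, if_neg ht]
      · rw [if_neg hs, ih]
        simp only [Bool.not_eq_true] at hs
        simp only [List.filter_cons, hs, Bool.false_eq_true, if_false]
    · simp only [Bool.not_eq_true] at hv
      simp only [hv, Bool.not_false, if_true, Bool.false_and, Bool.false_eq_true, if_false]

-- the three .replace passes filter the same characters as B's separator test
theorem filter_three (l : List Char) :
    ((l.filter (· ≠ '/')).filter (· ≠ '.')).filter (· ≠ '_')
      = l.filter (fun c => c != '/' && c != '.' && c != '_') := by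
  rw [List.filter_filter, List.filter_filter]
  apply List.filter_congr
  intro c _
  by_cases h1 : c = '/' <;> by_cases h2 : c = '.' <;> by_cases h3 : c = '_' <;>
    simp [h1, h2, h3]

-- ===== VERDICT (by name: the statement is the Claim_ definition above) =====
theorem validate_highfold_sequence_spec : Claim_equal_validate_highfold_sequence := by
  intro sequence _
  unfold Spec_validate_highfold_sequence validate_highfold_sequence validate_highfold_sequence_alt
  by_cases hempty : sequence = ""
  · simp [hempty]
  · simp only [hempty, if_false]
    rw [pvAltGo_spec]
    by_cases hall : sequence.toList.all (fun c => PySem.Set.contains pvValidChars c) = true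
    · rw [hall, if_pos rfl]
      simp only [Bool.not_true, Bool.false_eq_true, if_false]
      have hlen : PySem.Str.len (PySem.Str.replace (PySem.Str.replace (PySem.Str.replace sequence "/" "") "." "") "_" "")
          = ((sequence.toList.filter (fun c => c != '/' && c != '.' && c != '_')).length : Int) := by
        rw [PySem.Str.len_eq, PySem.Str.toList_replace, PySem.Str.toList_replace, PySem.Str.toList_replace]
        have h1 : ("/" : String).toList = ['/'] := rfl
        have h2 : ("." : String).toList = ['.'] := rfl
        have h3 : ("_" : String).toList = ['_'] := rfl
        have h0 : ("" : String).toList = [] := rfl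
        rw [h1, h2, h3, h0, replace_single, replace_single, replace_single, filter_three]
      rw [hlen]
      set n := (sequence.toList.filter (fun c => c != '/' && c != '.' && c != '_')).length with hn
      by_cases h3 : 3 ≤ n ∧ n ≤ 50
      · have hc : ((n : Int) < 3 || 50 < (n : Int)) = false := by
          simp only [Bool.or_eq_false_iff, decide_eq_false_iff_not, not_lt]
          constructor <;> [exact_mod_cast h3.1; exact_mod_cast h3.2]
        rw [hc]
        simp [h3]
      · have hc : ((n : Int) < 3 || 50 < (n : Int)) = true := by
          simp only [Bool.or_eq_true, decide_eq_true_eq]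
          omega
        rw [hc]
        simp [h3]
    · simp only [Bool.not_eq_true] at hall
      rw [hall]
      simp
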